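-- pv_equiv track=rewrite | github.com/Mahadhanalakshmi123/Working_with_numbers-PYTHON | Magical_number.py | count_magical_numbers
-- ===== SOURCE A (Python) =====
-- def count_magical_numbers(N):
--     magical_count = 0
--
--     for num in range(1, N + 1):
--         binary_str = bin(num)[2:].replace('1', '2').replace('0', '1')
--         digit_sum = sum(int(digit) for digit in binary_str)
--
--         if digit_sum % 2 != 0:
--             magical_count += 1
--
--     return magical_count
-- ===== SOURCE B (Python) =====
-- def count_magical_numbers(N):
--     # A number n is "magical" iff the digit sum of bin(n) with 1->2, 0->1 is odd,
--     # i.e. iff bit_length(n) + popcount(n) is odd.  For every k >= 1 exactly one of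
--     # the pair {2k, 2k+1} is magical (their parities differ by 1) and 1 is not
--     # magical, so for odd N the count is (N-1)//2.  For even N, C(N) = C(N+1) -
--     # magical(N+1), and magical(2k+1) equals the bit parity of k = N//2.
--     if N < 1:
--         return 0
--     if N % 2 == 1:
--         return (N - 1) // 2
--     k = N // 2
--     p = 0
--     while k:
--         p ^= 1 ^ (k & 1)
--         k >>= 1
--     return N // 2 - p
-- ===== Notes on version B (the rewrite author's own statement) =====
-- stated objective: faster
-- what changed: A scans every number 1..N and sums the digits of its transformed binary string; B uses that exactly one of each pair {2k, 2k+1} is magical, so the count is (N-1)//2 for odd N and N//2 minus one bit-parity loop over N//2 for even N.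
import Mathlib
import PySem

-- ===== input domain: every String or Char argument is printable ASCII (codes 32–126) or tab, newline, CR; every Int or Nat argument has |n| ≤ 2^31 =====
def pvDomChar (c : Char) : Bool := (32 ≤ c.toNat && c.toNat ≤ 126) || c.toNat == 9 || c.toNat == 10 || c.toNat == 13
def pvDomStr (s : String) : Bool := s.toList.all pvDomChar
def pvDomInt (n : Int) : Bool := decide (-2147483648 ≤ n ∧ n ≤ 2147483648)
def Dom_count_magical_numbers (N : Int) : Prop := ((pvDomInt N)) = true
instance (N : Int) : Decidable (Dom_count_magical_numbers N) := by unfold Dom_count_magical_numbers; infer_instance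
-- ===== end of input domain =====

-- B replaces A's per-number binary-string scan of 1..N by an O(log N) closed form:
-- exactly one of each pair {2k, 2k+1} is "magical", so odd N gives (N-1)//2 and even N
-- additionally needs one bit-parity loop for N//2.

-- ===== PORT A =====
def count_magical_numbers (N : Int) : Int :=
  (PySem.List.pyRange 1 (N + 1) 1).foldl
    (fun magical_count num =>
      let binary_str : String :=
        PySem.Str.replace
          (PySem.Str.replace (PySem.Str.slice (PySem.Int.pyBin num) (some 2) none) "1" "2") "0" "1"
      -- int(digit): every digit here is '1' or '2', so ofChars? is always some; .getD 0 is exact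
      let digit_sum : Int :=
        (binary_str.toList.map (fun digit => (PySem.Int.ofChars? [digit]).getD 0)).sum
      if PySem.Int.mod digit_sum 2 ≠ 0 then magical_count + 1 else magical_count)
    0

-- ===== PORT B =====
-- the 'while k: p ^= 1 ^ (k & 1); k >>= 1' loop of Source B; k ≥ 0 there, so on Nat
-- (k & 1 = k % 2, k >> 1 = k / 2, ^ = Nat.xor)
def pvMagLoop : Nat → Nat → Nat
  | 0, p => p
  | (k+1), p => pvMagLoop ((k+1) / 2) (p ^^^ (1 ^^^ ((k+1) % 2)))

def count_magical_numbers_alt (N : Int) : Int :=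
  if N < 1 then 0
  else if PySem.Int.mod N 2 = 1 then PySem.Int.floordiv (N - 1) 2
  else PySem.Int.floordiv N 2 - (pvMagLoop (PySem.Int.floordiv N 2).toNat 0 : Int)

-- ===== PRECONDITION & SPEC =====
def Spec_count_magical_numbers (N : Int) (out : Int) : Prop := out = count_magical_numbers_alt N
instance (N : Int) (out : Int) : Decidable (Spec_count_magical_numbers N out) := by unfold Spec_count_magical_numbers; infer_instance

-- ===== CLAIM (what is proved, stated in full; the proofs are below) =====
def Claim_equal_count_magical_numbers : Prop := ∀ (N : Int), Dom_count_magical_numbers N → Spec_count_magical_numbers N (count_magical_numbers N)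

-- ===== LEMMAS AND PROOFS =====

-- parity of (bit_length n + popcount n): each binary digit contributes (1 + bit) mod 2
def pvGpar : Nat → Bool
  | 0 => false
  | (n+1) => !(pvGpar ((n+1) / 2) ^^ decide ((n+1) % 2 = 1))

def pvGparI (n : Nat) : Int := if pvGpar n then 1 else 0

lemma pvGpar_pos (m : Nat) (hm : 1 ≤ m) :
    pvGpar m = !(pvGpar (m / 2) ^^ decide (m % 2 = 1)) := by
  cases m with
  | zero => omega
  | succ n => rw [pvGpar]

lemma pvGpar_double (m : Nat) (hm : 1 ≤ m) : pvGpar (2 * m) = !(pvGpar m) := by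
  rw [pvGpar_pos (2 * m) (by omega)]
  have h1 : 2 * m / 2 = m := by omega
  have h2 : 2 * m % 2 = 0 := by omega
  rw [h1, h2]
  simp

lemma pvGpar_odd (m : Nat) : pvGpar (2 * m + 1) = pvGpar m := by
  rw [pvGpar_pos (2 * m + 1) (by omega)]
  have h1 : (2 * m + 1) / 2 = m := by omega
  have h2 : (2 * m + 1) % 2 = 1 := by omega
  rw [h1, h2]
  cases h : pvGpar m <;> simp

lemma pvGparI_pair (m : Nat) (hm : 1 ≤ m) :
    pvGparI (2 * m) + pvGparI (2 * m + 1) = 1 := by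
  unfold pvGparI
  rw [pvGpar_double m hm, pvGpar_odd m]
  cases h : pvGpar m <;> simp

-- the while loop of B accumulates exactly the parity pvGpar into p by XOR
lemma pvMagLoop_eq (k : Nat) : ∀ p : Nat, pvMagLoop k p = p ^^^ (if pvGpar k then 1 else 0) := by
  induction k using Nat.strong_induction_on with
  | _ k IH =>
    intro p
    cases k with
    | zero => simp [pvMagLoop, pvGpar]
    | succ n =>
      rw [pvMagLoop, IH ((n+1)/2) (by omega), pvGpar, Nat.xor_assoc]
      congr 1
      have h2 : (n + 1) % 2 = 0 ∨ (n + 1) % 2 = 1 := by omega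
      cases h2 with
      | inl h => rw [h]; cases hg : pvGpar ((n+1)/2) <;> simp
      | inr h => rw [h]; cases hg : pvGpar ((n+1)/2) <;> simp

-- str.replace with single-character old/new is a character map
lemma pvReplace_go_single (a b : Char) :
    ∀ (fuel : Nat) (l acc : List Char), l.length ≤ fuel →
      PySem.Chars.replace.go [a] [b] fuel l acc
        = acc.reverse ++ l.map (fun c => if c = a then b else c) := by
  intro fuel
  induction fuel with
  | zero =>
    intro l acc h
    have : l = [] := by cases l <;> simp_all
    subst this
    rw [PySem.Chars.replace.go]
    simp
  | succ f IH =>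
    intro l acc h
    cases l with
    | nil =>
      rw [PySem.Chars.replace.go]
      simp
      omega
    | cons c t =>
      rw [PySem.Chars.replace.go]
      by_cases hc : c = a
      · have hpre : [a].isPrefixOf (c :: t) = true := by
          simp [List.isPrefixOf, hc]
        rw [if_pos hpre]
        have : List.drop [a].length (c :: t) = t := by simp
        rw [this, IH t ([b].reverse ++ acc) (by simpa using Nat.le_of_succ_le_succ h)]
        simp [hc]
      · have hpre : [a].isPrefixOf (c :: t) = false := by
          simp [List.isPrefixOf]
          exact fun hh => (hc hh.symm).elim
        rw [hpre]
        simp only [Bool.false_eq_true, if_false]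
        rw [IH t (c :: acc) (by simpa using Nat.le_of_succ_le_succ h)]
        simp [hc]

lemma pvReplace_single (a b : Char) (s : List Char) :
    PySem.Chars.replace s [a] [b] = s.map (fun c => if c = a then b else c) := by
  rw [PySem.Chars.replace]
  simp only [List.isEmpty_cons, Bool.false_eq_true, if_false]
  exact pvReplace_go_single a b s.length s [] (le_refl _)

-- the value A assigns to one transformed binary digit ('0' ↦ 1, '1' ↦ 2)
def pvH (c : Char) : Int :=
  (PySem.Int.ofChars?
    [if (if c = '1' then '2' else c) = '0' then '1' else (if c = '1' then '2' else c)]).getD 0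

-- A's digit_sum for the number m, expressed over Nat.toDigits
def pvDS (m : Nat) : Int := ((Nat.toDigits 2 m).map pvH).sum

lemma pvH_zero : pvH '0' = 1 := by decide
lemma pvH_one : pvH '1' = 2 := by decide

lemma pvKey (m : Nat) (hm : 1 ≤ m) : PySem.Int.mod (pvDS m) 2 = pvGparI m := by
  induction m using Nat.strong_induction_on with
  | _ m IH =>
    by_cases hlt : m < 2
    · have hm1 : m = 1 := by omega
      subst hm1
      have hds1 : pvDS 1 = 2 := by
        unfold pvDS
        rw [Nat.toDigits_of_lt_base (by omega)]
        have hd : (1 : Nat).digitChar = '1' := rfl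
        rw [hd]
        simp [pvH_one]
      have hg1 : pvGpar 1 = false := by
        rw [pvGpar_pos 1 (le_refl 1)]
        have h0 : (1 : Nat) / 2 = 0 := rfl
        rw [h0]
        simp [pvGpar]
      rw [hds1, PySem.Int.mod_eq_emod_of_pos (by norm_num)]
      unfold pvGparI
      rw [hg1]
      norm_num
    · have hrec : Nat.toDigits 2 m = Nat.toDigits 2 (m / 2) ++ [(m % 2).digitChar] := by
        rw [Nat.toDigits_eq_if (by omega)]
        rw [if_neg hlt]
      have hds : pvDS m = pvDS (m / 2) + pvH ((m % 2).digitChar) := by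
        unfold pvDS
        rw [hrec]
        simp
      have hIH : PySem.Int.mod (pvDS (m / 2)) 2 = pvGparI (m / 2) :=
        IH (m / 2) (by omega) (by omega)
      rw [PySem.Int.mod_eq_emod_of_pos (by norm_num)] at hIH ⊢
      rw [pvGparI, pvGpar_pos m (by omega), hds]
      rw [pvGparI] at hIH
      have h2 : m % 2 = 0 ∨ m % 2 = 1 := by omega
      cases h2 with
      | inl h =>
        rw [h]
        have : (0 : Nat).digitChar = '0' := rfl
        rw [this, pvH_zero]
        cases hg : pvGpar (m / 2) <;> simp [hg] at hIH ⊢ <;> omega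
      | inr h =>
        rw [h]
        have : (1 : Nat).digitChar = '1' := rfl
        rw [this, pvH_one]
        cases hg : pvGpar (m / 2) <;> simp [hg] at hIH ⊢ <;> omega

-- A's digit_sum expression for num = ↑m (m ≥ 1) equals pvDS m
lemma pvBody (m : Nat) (hm : 1 ≤ m) :
    ((PySem.Str.replace
        (PySem.Str.replace (PySem.Str.slice (PySem.Int.pyBin (m : Int)) (some 2) none) "1" "2")
        "0" "1").toList.map (fun digit => (PySem.Int.ofChars? [digit]).getD 0)).sum = pvDS m := by
  have h1 : ("1" : String).toList = ['1'] := rfl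
  have h2 : ("2" : String).toList = ['2'] := rfl
  have h0 : ("0" : String).toList = ['0'] := rfl
  rw [PySem.Str.toList_replace, PySem.Str.toList_replace, PySem.Str.toList_slice,
      PySem.Int.toList_pyBin, h1, h2, h0]
  have hbin : PySem.Int.toBinChars0b (m : Int) = '0' :: 'b' :: Nat.toDigits 2 m := by
    rw [PySem.Int.toBinChars0b]
    rw [if_neg (by omega)]
    simp
  rw [hbin]
  have hslice : PySem.Chars.slice ('0' :: 'b' :: Nat.toDigits 2 m) (some 2) none
      = Nat.toDigits 2 m := by
    rw [PySem.Chars.slice_eq_listSlice, PySem.List.slice_from _ (by norm_num)]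
    rfl
  rw [hslice, pvReplace_single, pvReplace_single, List.map_map, List.map_map]
  unfold pvDS pvH
  rfl

def pvGparII (n : Nat) : Int := pvGparI n  -- alias kept out of simp sets

-- one step of A's fold
lemma pvA_succ (n : Nat) :
    count_magical_numbers ((n : Int) + 1) = count_magical_numbers (n : Int) + pvGparI (n + 1) := by
  unfold count_magical_numbers
  have hsplit : PySem.List.pyRange 1 ((n : Int) + 1 + 1) 1
      = PySem.List.pyRange 1 ((n : Int) + 1) 1 ++ [(n : Int) + 1] :=
    PySem.List.pyRange_one_succ_right (by omega)
  rw [hsplit, List.foldl_append, List.foldl_cons, List.foldl_nil]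
  have hcast : ((n : Int) + 1) = ((n + 1 : Nat) : Int) := by push_cast; ring
  rw [hcast]
  have hds := pvBody (n + 1) (by omega)
  simp only [hds]
  rw [pvKey (n + 1) (by omega)]
  unfold pvGparI
  cases hg : pvGpar (n + 1) <;> simp

lemma pvA_zero (N : Int) (h : N < 1) : count_magical_numbers N = 0 := by
  unfold count_magical_numbers
  rw [PySem.List.pyRange_one_eq_nil (by omega)]
  rfl

lemma pvA_odd (k : Nat) : count_magical_numbers (2 * (k : Int) + 1) = k := by
  induction k with
  | zero =>
    have hz : count_magical_numbers ((0 : Nat) : Int) = 0 := pvA_zero _ (by norm_num)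
    have h : (2 * ((0 : Nat) : Int) + 1) = ((0 : Nat) : Int) + 1 := by norm_num
    rw [h, pvA_succ 0, hz]
    have hg1 : pvGpar 1 = false := by
      rw [pvGpar_pos 1 (le_refl 1)]
      have h0 : (1 : Nat) / 2 = 0 := rfl
      rw [h0]
      simp [pvGpar]
    simp [pvGparI, hg1]
  | succ k IH =>
    have h1 : (2 * ((k + 1 : Nat) : Int) + 1) = ((2 * k + 2 : Nat) : Int) + 1 := by
      push_cast; ring
    have h2 : ((2 * k + 2 : Nat) : Int) = ((2 * k + 1 : Nat) : Int) + 1 := by push_cast; ring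
    have h3 : ((2 * k + 1 : Nat) : Int) = 2 * (k : Int) + 1 := by push_cast; ring
    rw [h1, pvA_succ (2 * k + 2), h2, pvA_succ (2 * k + 1), h3, IH]
    have hpair : pvGparI (2 * (k + 1)) + pvGparI (2 * (k + 1) + 1) = 1 :=
      pvGparI_pair (k + 1) (by omega)
    have e1 : 2 * k + 2 + 1 = 2 * (k + 1) + 1 := by omega
    have e2 : 2 * k + 1 + 1 = 2 * (k + 1) := by omega
    rw [e1, e2]
    push_cast
    omega

lemma pvA_even (k : Nat) : count_magical_numbers (2 * (k : Int)) = k - pvGparI k := by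
  have h2 : (2 * (k : Int) + 1) = ((2 * k : Nat) : Int) + 1 := by push_cast; ring
  have h3 := pvA_odd k
  rw [h2, pvA_succ (2 * k)] at h3
  have hodd : pvGparI (2 * k + 1) = pvGparI k := by unfold pvGparI; rw [pvGpar_odd k]
  rw [hodd] at h3
  have h4 : ((2 * k : Nat) : Int) = 2 * (k : Int) := by push_cast; ring
  rw [h4] at h3
  cases hg : pvGpar k <;> simp [pvGparI, hg] at h3 ⊢ <;> omega

lemma pvMagLoop_gpar (k : Nat) : (pvMagLoop k 0 : Int) = pvGparI k := by
  rw [pvMagLoop_eq k 0]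
  unfold pvGparI
  cases h : pvGpar k <;> simp

-- ===== VERDICT (by name: the statement is the Claim_ definition above) =====
theorem count_magical_numbers_spec : Claim_equal_count_magical_numbers := by
  intro N _
  unfold Spec_count_magical_numbers count_magical_numbers_alt
  by_cases hN : N < 1
  · rw [if_pos hN, pvA_zero N hN]
  · rw [if_neg hN]
    have hN0 : 0 ≤ N := by omega
    obtain ⟨k, hk⟩ : ∃ k : Nat, N = (k : Int) := ⟨N.toNat, by omega⟩
    subst hk
    have h2 : k % 2 = 0 ∨ k % 2 = 1 := by omega
    cases h2 with
    | inr hodd =>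
      obtain ⟨m, hm⟩ : ∃ m : Nat, k = 2 * m + 1 := ⟨k / 2, by omega⟩
      subst hm
      have hmod : PySem.Int.mod ((2 * m + 1 : Nat) : Int) 2 = 1 := by
        rw [PySem.Int.mod_eq_emod_of_pos (by norm_num)]
        push_cast
        omega
      rw [if_pos hmod]
      have hdiv : PySem.Int.floordiv (((2 * m + 1 : Nat) : Int) - 1) 2 = (m : Int) := by
        rw [PySem.Int.floordiv_eq_ediv_of_pos (by norm_num)]
        push_cast
        omega
      rw [hdiv]
      have hc : ((2 * m + 1 : Nat) : Int) = 2 * (m : Int) + 1 := by push_cast; ring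
      rw [hc, pvA_odd m]
    | inl heven =>
      obtain ⟨m, hm⟩ : ∃ m : Nat, k = 2 * m := ⟨k / 2, by omega⟩
      subst hm
      have hmod : PySem.Int.mod ((2 * m : Nat) : Int) 2 = 0 := by
        rw [PySem.Int.mod_eq_emod_of_pos (by norm_num)]
        push_cast
        omega
      rw [hmod]
      simp only [if_neg (by norm_num : ¬ (0 : Int) = 1)]
      have hdiv : PySem.Int.floordiv ((2 * m : Nat) : Int) 2 = (m : Int) := by
        rw [PySem.Int.floordiv_eq_ediv_of_pos (by norm_num)]
        push_cast
        omega
      rw [hdiv]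
      have htn : ((m : Int)).toNat = m := by omega
      rw [htn, pvMagLoop_gpar m]
      have hc : ((2 * m : Nat) : Int) = 2 * (m : Int) := by push_cast; ring
      rw [hc, pvA_even m]
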